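-- pv_equiv track=rewrite | github.com/MikeDoes/thesis | evaluators/wire57/src/evaluation_support.py | aggregate_exact_matches
-- ===== SOURCE A (Python) =====
-- def aggregate_exact_matches(match_matrix):
--
--     # For this agregation task, no predicted tuple can exact-match two annotations
--     # ones, so it's easy, look at lines and columns looking for OR-total booleans.
--     recall = [0, len(match_matrix)]
--     for annotations_matches in match_matrix:
--         recall[0] += sum([any(annotations_matches)])
--
--     # removed the extra , 0
--     # ^ this is [3,5] for "3 out of 5", to be lumped together later.
--     number_of_predictions = len(match_matrix[0])
--     if number_of_predictions == 0:
--         precision = [0, 0] # N/A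
--
--     else:
--         precision = [0, number_of_predictions]
--         for i in range(number_of_predictions):
--             precision[0] += sum([any([annotation[i] for annotation in match_matrix])])
--
--
--     # f1 = 2 * precision * recall / (precision + recall)
--     metrics = {'precision' : precision,
--                'recall' : recall}
--     return metrics
-- ===== SOURCE B (Python) =====
-- def aggregate_exact_matches(match_matrix):
--     # Single pass over the rows, maintaining per-column "seen a match" flags,
--     # instead of A's second nested loop over columns.
--     number_of_predictions = len(match_matrix[0])
--     column_seen = [False] * number_of_predictions
--     row_count = 0
--     for row in match_matrix:
--         if any(row):
--             row_count += 1
--         for i in range(number_of_predictions):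
--             column_seen[i] = column_seen[i] or row[i]
--     recall = [row_count, len(match_matrix)]
--     if number_of_predictions == 0:
--         precision = [0, 0]  # N/A
--     else:
--         precision = [sum(1 for c in column_seen if c), number_of_predictions]
--     return {'precision': precision, 'recall': recall}
-- ===== Notes on version B (the rewrite author's own statement) =====
-- stated objective: alternative
-- what changed: B replaces A's second loop over columns (each rescanning the whole matrix) with a single pass over the rows that maintains per-column seen-flags and a row counter, computing precision and recall together.
import Mathlib
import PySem

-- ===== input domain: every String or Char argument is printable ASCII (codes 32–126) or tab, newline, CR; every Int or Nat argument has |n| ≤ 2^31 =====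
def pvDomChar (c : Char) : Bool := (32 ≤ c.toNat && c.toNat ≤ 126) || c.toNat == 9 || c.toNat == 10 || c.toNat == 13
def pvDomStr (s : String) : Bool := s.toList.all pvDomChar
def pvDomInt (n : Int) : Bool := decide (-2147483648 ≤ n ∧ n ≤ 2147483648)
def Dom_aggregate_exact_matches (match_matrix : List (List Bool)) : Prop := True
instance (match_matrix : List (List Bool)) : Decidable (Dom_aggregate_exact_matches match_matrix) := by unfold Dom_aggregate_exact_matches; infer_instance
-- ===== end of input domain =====

-- B merges A's separate column loop into the single row pass via per-column seen-flags; same cost, different decomposition.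

-- ===== PORT A =====
def aggregate_exact_matches (match_matrix : List (List Bool)) : List (String × List Int) :=
  -- recall = [0, len(match_matrix)]; for row: recall[0] += sum([any(row)])
  let recall0 : Int :=
    match_matrix.foldl (fun acc annotations_matches =>
      acc + (if annotations_matches.any id then 1 else 0)) 0
  let recall_v : List Int := [recall0, (match_matrix.length : Int)]
  -- number_of_predictions = len(match_matrix[0])  (IndexError on []; excluded by Pre_)
  match PySem.List.pyGet? match_matrix 0 with
  | none => []   -- unreachable under Pre_aggregate_exact_matches
  | some row0 =>
    let number_of_predictions := row0.length
    let precision : List Int :=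
      if number_of_predictions = 0 then [0, 0]
      else
        let p0 : Int :=
          (PySem.List.pyRange 0 (number_of_predictions : Int) 1).foldl (fun acc i =>
            -- annotation[i] raises on too-short rows; excluded by Pre_, so the default is unreached
            acc + (if match_matrix.any (fun annotation => (PySem.List.pyGet? annotation i).getD false) then 1 else 0)) 0
        [p0, (number_of_predictions : Int)]
    [("precision", precision), ("recall", recall_v)]

-- ===== PORT B =====
-- step of B's single pass: bump the row counter, OR each column flag with this row
def pvStepB (n : Nat) (st : Int × List Bool) (row : List Bool) : Int × List Bool :=
  (st.1 + (if row.any id then 1 else 0),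
   (List.range n).map (fun i => st.2.getD i false || row.getD i false))

def aggregate_exact_matches_alt (match_matrix : List (List Bool)) : List (String × List Int) :=
  match match_matrix with
  | [] => []   -- IndexError on len(match_matrix[0]); unreachable under Pre_
  | row0 :: _ =>
    let n := row0.length
    let st := match_matrix.foldl (pvStepB n) (0, List.replicate n false)
    let recall_v : List Int := [st.1, (match_matrix.length : Int)]
    let precision : List Int :=
      if n = 0 then [0, 0]
      else [(st.2.countP id : Int), (n : Int)]
    [("precision", precision), ("recall", recall_v)]

-- ===== PRECONDITION & SPEC =====
-- Pre_ excludes exactly the inputs where Python A raises IndexError: the empty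
-- matrix, and ragged matrices with some row shorter than the first row.
def Pre_aggregate_exact_matches (match_matrix : List (List Bool)) : Prop :=
  match_matrix ≠ [] ∧ ∀ row ∈ match_matrix, (match_matrix.headD []).length ≤ row.length
instance (match_matrix : List (List Bool)) : Decidable (Pre_aggregate_exact_matches match_matrix) := by
  unfold Pre_aggregate_exact_matches; infer_instance

def pvWitness_aggregate_exact_matches : List (List Bool) := [[true, false], [false, false], [false, true]]

def Spec_aggregate_exact_matches (match_matrix : List (List Bool)) (out : List (String × List Int)) : Prop := out = aggregate_exact_matches_alt match_matrix
instance (match_matrix : List (List Bool)) (out : List (String × List Int)) : Decidable (Spec_aggregate_exact_matches match_matrix out) := by unfold Spec_aggregate_exact_matches; infer_instance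

-- ===== CLAIM (what is proved, stated in full; the proofs are below) =====
def Claim_equal_aggregate_exact_matches : Prop := ∀ (match_matrix : List (List Bool)), Dom_aggregate_exact_matches match_matrix → Pre_aggregate_exact_matches match_matrix → Spec_aggregate_exact_matches match_matrix (aggregate_exact_matches match_matrix)

-- ===== LEMMAS AND PROOFS =====

-- first component of B's fold is A's recall_v counter
theorem pvStepB_fst (n : Nat) (m : List (List Bool)) : ∀ (a : Int) (s : List Bool),
    (m.foldl (pvStepB n) (a, s)).1
      = m.foldl (fun acc row => acc + (if row.any id then 1 else 0)) a := by
  induction m with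
  | nil => intro a s; rfl
  | cons r m ih => intro a s; simpa [pvStepB] using ih _ _

-- second component of B's fold: column i seen ⟺ some row has a match in column i
theorem pvStepB_snd (n : Nat) (m : List (List Bool)) : ∀ (a : Int) (g : Nat → Bool),
    (m.foldl (pvStepB n) (a, (List.range n).map g)).2
      = (List.range n).map (fun i => g i || m.any (fun r => r.getD i false)) := by
  induction m with
  | nil => intro a g; simp
  | cons r m ih =>
    intro a g
    have hstep : (pvStepB n (a, (List.range n).map g) r)
        = (a + (if r.any id then 1 else 0),
           (List.range n).map (fun i => g i || r.getD i false)) := by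
      unfold pvStepB
      refine Prod.ext rfl ?_
      apply List.map_congr_left
      intro i hi
      rw [List.getD_eq_getElem?_getD]
      simp [List.mem_range.mp hi]
    rw [List.foldl_cons, hstep, ih]
    apply List.map_congr_left
    intro i _
    simp [Bool.or_assoc]

-- A's column loop counts exactly the columns below n whose OR over all rows is true
theorem pA_eq_countP (m : List (List Bool)) : ∀ (n : Nat),
    (PySem.List.pyRange 0 (n : Int) 1).foldl (fun acc i =>
        acc + (if m.any (fun annotation => (PySem.List.pyGet? annotation i).getD false) then 1 else 0)) (0 : Int)
      = ((List.range n).countP (fun j => m.any (fun r => r.getD j false)) : Int) := by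
  intro n
  induction n with
  | zero => simp [PySem.List.pyRange_one_eq_nil]
  | succ n ih =>
    have hsplit : PySem.List.pyRange 0 ((n + 1 : Nat) : Int) 1
        = PySem.List.pyRange 0 (n : Int) 1 ++ [(n : Int)] := by
      have := PySem.List.pyRange_one_succ_right (a := 0) (b := (n : Int)) (by exact_mod_cast Nat.zero_le n)
      simpa [Nat.cast_add] using this
    rw [hsplit, List.foldl_append, ih, List.range_succ, List.countP_append]
    simp [List.getD_eq_getElem?_getD]

-- ===== VERDICT (by name: the statement is the Claim_ definition above) =====
theorem aggregate_exact_matches_spec : Claim_equal_aggregate_exact_matches := by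
  intro m _ hpre
  obtain ⟨hne, -⟩ := hpre
  obtain ⟨r0, rest, rfl⟩ : ∃ r0 rest, m = r0 :: rest := by
    cases m with
    | nil => exact absurd rfl hne
    | cons a b => exact ⟨a, b, rfl⟩
  show aggregate_exact_matches _ = aggregate_exact_matches_alt _
  unfold aggregate_exact_matches aggregate_exact_matches_alt
  have hget : PySem.List.pyGet? (r0 :: rest) (0 : Int) = some r0 := by
    simp [PySem.List.pyGet?, PySem.List.pyIdx?]
  have hrepl : List.replicate r0.length false
      = (List.range r0.length).map (fun _ => false) := by simp
  have hfst := pvStepB_fst r0.length (r0 :: rest) 0 (List.replicate r0.length false)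
  have hsnd := pvStepB_snd r0.length (r0 :: rest) 0 (fun _ => false)
  rw [← hrepl] at hsnd
  simp only [hget]
  simp only [hfst, hsnd, Bool.false_or, List.countP_map, Function.comp_def, id_eq,
    pA_eq_countP]
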